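-- pv_equiv track=rewrite | github.com/AdrianMuntean/project-Euler | 62_cubic_permutations.py | compute_cubes
-- ===== SOURCE A (Python) =====
-- def compute_cubes(upper_limit):
--     digits_to_cube = {}
--     for i in range(100, upper_limit):
--         cube = i**3
--         # the key of the dict is the sorted string made of the digits
--         digits = [i for i in str(cube)]
--         digits = ''.join(sorted(digits))
--
--         value = digits_to_cube.get(digits) or []
--         value.append(cube)
--         digits_to_cube[digits] = value
--
--     return digits_to_cube
-- ===== SOURCE B (Python) =====
-- def compute_cubes(upper_limit):
--     # Sort-then-group: pair every cube with its sorted-digit signature, sort the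
--     # pairs by signature (stable, so cubes stay in increasing order inside a
--     # signature), cut the sorted list into runs of equal signature, and emit the
--     # groups keyed in the signatures' first-appearance order (as A's dict does).
--     pairs = [(''.join(sorted(str(i ** 3))), i ** 3) for i in range(100, upper_limit)]
--     ordered = sorted(pairs, key=lambda p: p[0])
--     groups = []
--     idx = 0
--     n = len(ordered)
--     while idx < n:
--         sig = ordered[idx][0]
--         run = [ordered[idx][1]]
--         idx += 1
--         while idx < n and ordered[idx][0] == sig:
--             run.append(ordered[idx][1])
--             idx += 1
--         groups.append((sig, run))
--     lookup = dict(groups)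
--     return {sig: lookup.get(sig, []) for sig in dict.fromkeys(s for s, _ in pairs)}
-- ===== Notes on version B (the rewrite author's own statement) =====
-- stated objective: alternative
-- what changed: A builds the dict incrementally, appending each cube to its signature's bucket as it scans the range; B pairs every cube with its signature once, stably sorts the pairs by signature, cuts the sorted list into runs of equal signature, and re-keys the groups in first-appearance order.
import Mathlib
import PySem

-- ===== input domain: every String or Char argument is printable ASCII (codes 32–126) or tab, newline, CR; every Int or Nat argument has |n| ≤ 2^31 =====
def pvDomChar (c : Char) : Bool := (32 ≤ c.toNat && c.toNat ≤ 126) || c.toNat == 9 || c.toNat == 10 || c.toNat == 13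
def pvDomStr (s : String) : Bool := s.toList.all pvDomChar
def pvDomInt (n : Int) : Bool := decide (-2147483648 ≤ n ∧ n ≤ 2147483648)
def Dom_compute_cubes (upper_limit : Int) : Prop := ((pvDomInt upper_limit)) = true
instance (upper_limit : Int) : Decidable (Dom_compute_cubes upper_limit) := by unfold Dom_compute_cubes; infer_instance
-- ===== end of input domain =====

-- B replaces A's incremental dict accumulation by stable sort-by-signature + run cutting +
-- reorder to first-appearance key order (objective: alternative; same return value).

-- ===== PORT A =====
-- ''.join(sorted(str(cube))) — the sorted-digit signature (same expression in both Pythons)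
def pvSig (cube : Int) : String :=
  String.ofList (PySem.List.sorted (PySem.Int.toStr cube).toList (fun c => c) false)

def compute_cubes (upper_limit : Int) : List (String × List Int) :=
  ((PySem.List.pyRange 100 upper_limit 1).foldl (fun d i =>
      let cube := i ^ 3
      let digits := pvSig cube
      -- value = digits_to_cube.get(digits) or []   (an empty list is falsy)
      let value : List Int :=
        match d.get? digits with
        | some v => if v = [] then [] else v
        | none => []
      d.insert digits (value ++ [cube]))
    PySem.Dict.empty).items

-- ===== PORT B =====
-- Source B's two index-driven while loops: cut the sorted pair list into runs of equal
-- signature (the index walk over the remainder ported as structural recursion; exact)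
def pvRuns : List (String × Int) → List (String × List Int)
  | [] => []
  | (s, c) :: rest =>
    (s, c :: (rest.takeWhile (fun p => p.1 == s)).map (·.2)) ::
      pvRuns (rest.dropWhile (fun p => p.1 == s))
termination_by l => l.length
decreasing_by
  simp only [List.length_cons]
  exact Nat.lt_succ_of_le (List.length_dropWhile_le _ _)

def compute_cubes_alt (upper_limit : Int) : List (String × List Int) :=
  let pairs := (PySem.List.pyRange 100 upper_limit 1).map (fun i => (pvSig (i ^ 3), i ^ 3))
  let ordered := PySem.List.sorted pairs (fun p => p.1) false
  let groups := pvRuns ordered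
  let lookup := PySem.Dict.ofList groups
  ((PySem.List.dedup (pairs.map (·.1))).foldl
      (fun d s => d.insert s (lookup.getD s [])) PySem.Dict.empty).items

-- ===== PRECONDITION & SPEC =====
def Spec_compute_cubes (upper_limit : Int) (out : List (String × List Int)) : Prop := out = compute_cubes_alt upper_limit
instance (upper_limit : Int) (out : List (String × List Int)) : Decidable (Spec_compute_cubes upper_limit out) := by unfold Spec_compute_cubes; infer_instance

-- ===== CLAIM (what is proved, stated in full; the proofs are below) =====
def Claim_equal_compute_cubes : Prop := ∀ (upper_limit : Int), Dom_compute_cubes upper_limit → Spec_compute_cubes upper_limit (compute_cubes upper_limit)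

-- ===== LEMMAS AND PROOFS =====

-- the signature/cube pair list both proofs are phrased over
def pvPairs (u : Int) : List (String × Int) :=
  (PySem.List.pyRange 100 u 1).map (fun i => (pvSig (i ^ 3), i ^ 3))

-- STABILITY of PySem's insertion sort, phrased through one signature class
theorem pv_pairwise_insertBy (x : String × Int) (acc : List (String × Int))
    (h : acc.Pairwise (fun a b => a.1 ≤ b.1)) :
    (PySem.List.insertBy (fun a b => decide (a.1 < b.1)) x acc).Pairwise
      (fun a b => a.1 ≤ b.1) := by
  induction acc with
  | nil => simp [PySem.List.insertBy]
  | cons y ys ih =>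
    rw [List.pairwise_cons] at h
    obtain ⟨hy, hys⟩ := h
    rw [PySem.List.insertBy]
    by_cases hlt : x.1 < y.1
    · simp only [hlt, decide_true, if_true]
      refine List.Pairwise.cons ?_ (List.Pairwise.cons hy hys)
      intro z hz
      rcases List.mem_cons.mp hz with rfl | hz
      · exact le_of_lt hlt
      · exact le_trans (le_of_lt hlt) (hy z hz)
    · simp only [hlt, decide_false, Bool.false_eq_true, if_false]
      refine List.Pairwise.cons ?_ (ih hys)
      intro z hz
      rw [PySem.List.mem_insertBy] at hz
      rcases hz with rfl | hz
      · exact le_of_not_gt hlt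
      · exact hy z hz

theorem pv_filter_insertBy (s : String) (x : String × Int) (acc : List (String × Int))
    (h : acc.Pairwise (fun a b => a.1 ≤ b.1)) :
    (PySem.List.insertBy (fun a b => decide (a.1 < b.1)) x acc).filter (fun p => p.1 == s)
      = acc.filter (fun p => p.1 == s) ++ if x.1 == s then [x] else [] := by
  induction acc with
  | nil =>
    rw [PySem.List.insertBy]
    by_cases hxs : x.1 = s <;> simp [hxs]
  | cons y ys ih =>
    rw [List.pairwise_cons] at h
    obtain ⟨hy, hys⟩ := h
    rw [PySem.List.insertBy]
    by_cases hlt : x.1 < y.1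
    · simp only [hlt, decide_true, if_true]
      by_cases hxs : x.1 = s
      · have hnone : (y :: ys).filter (fun p => p.1 == s) = [] := by
          rw [List.filter_eq_nil_iff]
          intro p hp
          have hle : y.1 ≤ p.1 := by
            rcases List.mem_cons.mp hp with rfl | hp
            · exact le_refl _
            · exact hy p hp
          have hlt' : s < p.1 := lt_of_lt_of_le (hxs ▸ hlt) hle
          simp only [beq_iff_eq]
          exact fun hps => absurd hps (ne_of_gt hlt')
        rw [List.filter_cons]
        simp only [hxs, beq_self_eq_true, if_true]
        rw [hnone]
        simp
      · rw [List.filter_cons]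
        simp only [List.filter_cons] at *
        have hf : (x.1 == s) = false := by simp [hxs]
        simp [hf]
    · simp only [hlt, decide_false, Bool.false_eq_true, if_false]
      rw [List.filter_cons, List.filter_cons, ih hys]
      by_cases hys' : y.1 = s <;> simp [hys']

theorem pv_filter_foldl (s : String) (l : List (String × Int)) :
    ∀ acc : List (String × Int), acc.Pairwise (fun a b => a.1 ≤ b.1) →
    (l.foldl (fun acc x => PySem.List.insertBy (fun a b => decide (a.1 < b.1)) x acc) acc).filter
        (fun p => p.1 == s)
      = acc.filter (fun p => p.1 == s) ++ l.filter (fun p => p.1 == s) := by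
  induction l with
  | nil => intro acc _; simp
  | cons x xs ih =>
    intro acc hacc
    rw [List.foldl_cons, ih _ (pv_pairwise_insertBy x acc hacc), pv_filter_insertBy s x acc hacc,
      List.filter_cons]
    by_cases hxs : x.1 = s <;> simp [hxs]

theorem pv_filter_sorted (l : List (String × Int)) (s : String) :
    (PySem.List.sorted l (fun p => p.1) false).filter (fun p => p.1 == s)
      = l.filter (fun p => p.1 == s) := by
  rw [PySem.List.sorted_eq_foldl_insertBy]
  simpa using pv_filter_foldl s l [] List.Pairwise.nil

-- keys after the dropped run differ from the run's signature
theorem pv_dropWhile_keys_ne (rest : List (String × Int)) (s0 : String)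
    (hp : rest.Pairwise (fun a b => a.1 ≤ b.1)) (hge : ∀ p ∈ rest, s0 ≤ p.1) :
    ∀ p ∈ rest.dropWhile (fun q => q.1 == s0), ¬ p.1 = s0 := by
  induction rest with
  | nil => simp
  | cons q r ih =>
    rw [List.pairwise_cons] at hp
    obtain ⟨hq, hr⟩ := hp
    by_cases hq0 : q.1 = s0
    · rw [List.dropWhile_cons_of_pos (by simp [hq0])]
      exact ih hr (fun p hpm => hge p (List.mem_cons_of_mem _ hpm))
    · rw [List.dropWhile_cons_of_neg (by simp [hq0])]
      intro p hpm
      rcases List.mem_cons.mp hpm with rfl | hpm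
      · exact hq0
      · intro hps
        have h1 : q.1 ≤ p.1 := hq p hpm
        have h2 : s0 ≤ q.1 := hge q (List.mem_cons_self)
        exact hq0 (le_antisymm (hps ▸ h1) h2)

-- run cutting on a key-sorted list: keys are distinct, are exactly the list's keys,
-- and each run is its key's whole filter class
theorem pv_runs_spec (ys : List (String × Int))
    (h : ys.Pairwise (fun a b => a.1 ≤ b.1)) :
    ((pvRuns ys).map (·.1)).Nodup ∧
    (∀ s, s ∈ (pvRuns ys).map (·.1) ↔ s ∈ ys.map (·.1)) ∧
    (∀ s v, (s, v) ∈ pvRuns ys → v = (ys.filter (fun p => p.1 == s)).map (·.2)) := by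
  induction ys using pvRuns.induct with
  | case1 => simp [pvRuns]
  | case2 s0 c rest ih =>
    rw [List.pairwise_cons] at h
    obtain ⟨hhead, hrest⟩ := h
    obtain ⟨ihn, ihm, ihv⟩ := ih (hrest.sublist (List.dropWhile_sublist _))
    have hdne : ∀ p ∈ rest.dropWhile (fun q => q.1 == s0), ¬ p.1 = s0 :=
      pv_dropWhile_keys_ne rest s0 hrest (fun p hp => hhead p hp)
    have htkey : ∀ p ∈ rest.takeWhile (fun q => q.1 == s0), p.1 = s0 := by
      intro p hp
      have := List.mem_takeWhile_imp hp
      simpa using this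
    have hsplit : rest = rest.takeWhile (fun q => q.1 == s0) ++ rest.dropWhile (fun q => q.1 == s0) :=
      (List.takeWhile_append_dropWhile).symm
    have hmem : ∀ s', s' ∈ (pvRuns ((s0, c) :: rest)).map (·.1) ↔ s' ∈ ((s0, c) :: rest).map (·.1) := by
      intro s'
      rw [pvRuns]
      simp only [List.map_cons, List.mem_cons]
      rw [ihm s']
      constructor
      · rintro (rfl | hs)
        · exact Or.inl rfl
        · right
          rw [hsplit, List.map_append, List.mem_append]
          exact Or.inr hs
      · rintro (rfl | hs)
        · exact Or.inl rfl
        · rw [hsplit, List.map_append, List.mem_append] at hs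
          rcases hs with hs | hs
          · obtain ⟨p, hp, hps⟩ := List.mem_map.mp hs
            exact Or.inl (by rw [← hps]; exact htkey p hp)
          · exact Or.inr hs
    refine ⟨?_, hmem, ?_⟩
    · rw [pvRuns]
      simp only [List.map_cons, List.nodup_cons]
      refine ⟨?_, ihn⟩
      intro hmem0
      rw [ihm] at hmem0
      obtain ⟨p, hp, hps⟩ := List.mem_map.mp hmem0
      exact hdne p hp hps
    · intro s v hv
      rw [pvRuns] at hv
      rcases List.mem_cons.mp hv with heq | hv
      · rw [Prod.mk.injEq] at heq
        obtain ⟨hs, hv'⟩ := heq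
        subst hs
        have hfilter : ((s, c) :: rest).filter (fun p => p.1 == s) =
            (s, c) :: rest.takeWhile (fun q => q.1 == s) := by
          rw [List.filter_cons_of_pos (by simp)]
          conv_lhs => rw [hsplit]
          rw [List.filter_append]
          have h1 : (rest.takeWhile (fun q => q.1 == s)).filter (fun p => p.1 == s) =
              rest.takeWhile (fun q => q.1 == s) :=
            List.filter_eq_self.mpr (fun p hp => by simp [htkey p hp])
          have h2 : (rest.dropWhile (fun q => q.1 == s)).filter (fun p => p.1 == s) = [] :=
            List.filter_eq_nil_iff.mpr (fun p hp => by simp [hdne p hp])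
          rw [h1, h2, List.append_nil]
        rw [hfilter, List.map_cons]
        exact hv'
      · have hvv := ihv s v hv
        have hns : ¬ s = s0 := by
          intro hss
          have hmem1 : s ∈ (pvRuns (rest.dropWhile (fun q => q.1 == s0))).map (·.1) :=
            List.mem_map.mpr ⟨(s, v), hv, rfl⟩
          rw [ihm] at hmem1
          obtain ⟨p, hp, hps⟩ := List.mem_map.mp hmem1
          exact hdne p hp (hps.trans hss)
        have h1 : (rest.takeWhile (fun q => q.1 == s0)).filter (fun p => p.1 == s) = [] :=
          List.filter_eq_nil_iff.mpr (fun p hp => by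
            simp only [beq_iff_eq]
            rw [htkey p hp]
            exact fun hh => hns hh.symm)
        have hfilter : ((s0, c) :: rest).filter (fun p => p.1 == s) =
            (rest.dropWhile (fun q => q.1 == s0)).filter (fun p => p.1 == s) := by
          rw [List.filter_cons_of_neg (by simp only [beq_iff_eq]; exact fun hh => hns hh.symm)]
          conv_lhs => rw [hsplit]
          rw [List.filter_append, h1, List.nil_append]
        rw [hfilter]
        exact hvv

-- A's dict loop, characterised: keys in first-appearance order, values the filter classes
theorem pv_A_items (u : Int) :
    compute_cubes u =
      (PySem.List.dedup ((pvPairs u).map (·.1))).map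
        (fun s => (s, ((pvPairs u).filter (fun p => p.1 == s)).map (·.2))) := by
  have hstep : (PySem.List.pyRange 100 u 1).foldl (fun d i =>
      let cube := i ^ 3
      let digits := pvSig cube
      let value : List Int :=
        match d.get? digits with
        | some v => if v = [] then [] else v
        | none => []
      d.insert digits (value ++ [cube])) PySem.Dict.empty
      = (pvPairs u).foldl (fun d p => d.modify p.1 [] (fun v => v ++ [p.2])) PySem.Dict.empty := by
    rw [pvPairs, List.foldl_map]
    apply PySem.List.foldl_congr_mem
    intro d i _
    simp only [PySem.Dict.modify]
    congr 1
    rcases hg : d.get? (pvSig (i ^ 3)) with _ | v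
    · rw [PySem.Dict.getD_of_get?_eq_none _ _ hg]
    · rw [PySem.Dict.getD_of_get?_eq_some _ _ hg]
      cases v <;> simp
  set F := (pvPairs u).foldl (fun d p => d.modify p.1 [] (fun v => v ++ [p.2])) PySem.Dict.empty with hF
  have hnodup : F.keys.Nodup := by
    rw [hF]
    exact PySem.Dict.nodup_keys_foldl_modify_key _ _ _ _ _ (by simp [PySem.Dict.keys_empty])
  have hkeys : F.keys = PySem.List.dedup ((pvPairs u).map (·.1)) := by
    rw [hF, PySem.Dict.keys_foldl_modify_key, PySem.List.dedup_eq_ofList]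
    rfl
  have hgetD : ∀ c, F.getD c [] = ((pvPairs u).filter (fun p => p.1 == c)).map (·.2) := by
    intro c
    rw [hF, PySem.Dict.getD_foldl_modify_append, PySem.Dict.getD_empty, List.nil_append]
  rw [compute_cubes, hstep, PySem.Dict.items_eq_map_keys F hnodup [], hkeys]
  apply List.map_congr_left
  intro s _
  rw [hgetD]

-- B's sort + run cutting + reorder, characterised identically
theorem pv_B_items (u : Int) :
    compute_cubes_alt u =
      (PySem.List.dedup ((pvPairs u).map (·.1))).map
        (fun s => (s, ((pvPairs u).filter (fun p => p.1 == s)).map (·.2))) := by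
  have hpw : (PySem.List.sorted (pvPairs u) (fun p => p.1) false).Pairwise
      (fun a b => a.1 ≤ b.1) := PySem.List.sorted_pairwise (pvPairs u) (fun p => p.1)
  obtain ⟨hn, hm, hv⟩ := pv_runs_spec _ hpw
  set ordered := PySem.List.sorted (pvPairs u) (fun p => p.1) false with hord
  set lookup := PySem.Dict.ofList (pvRuns ordered) with hlk
  have hitems : lookup.items = pvRuns ordered := by
    rw [hlk, PySem.Dict.ofList]
    have hfr := PySem.Dict.items_foldl_insert_fresh (pvRuns ordered) (·.1) (·.2) PySem.Dict.empty
      (fun a _ => PySem.Dict.contains_empty _) hn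
    simpa [PySem.Dict.update] using hfr
  have hknd : lookup.keys.Nodup := by
    show (lookup.items.map (·.1)).Nodup
    rw [hitems]; exact hn
  have hgetD : ∀ s, s ∈ (pvPairs u).map (·.1) →
      lookup.getD s [] = ((pvPairs u).filter (fun p => p.1 == s)).map (·.2) := by
    intro s hs
    have hso : s ∈ ordered.map (·.1) := by
      have hperm : (ordered.map (·.1)).Perm ((pvPairs u).map (·.1)) :=
        (PySem.List.sorted_perm (pvPairs u) (fun p => p.1) false).map _
      exact hperm.mem_iff.mpr hs
    obtain ⟨⟨s', w⟩, hw, hws⟩ := List.mem_map.mp ((hm s).mpr hso)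
    rcases hws
    have hwv := hv _ _ hw
    have hl : lookup.getD s' [] = w := by
      apply PySem.Dict.getD_of_mem_items lookup _ hknd
      rw [hitems]; exact hw
    rw [hl, hwv, hord, pv_filter_sorted]
  show ((PySem.List.dedup ((pvPairs u).map (·.1))).foldl
      (fun d s => d.insert s (lookup.getD s [])) PySem.Dict.empty).items = _
  have hfresh := PySem.Dict.items_foldl_insert_fresh
      (PySem.List.dedup ((pvPairs u).map (·.1))) (fun s => s) (fun s => lookup.getD s [])
      PySem.Dict.empty (fun a _ => PySem.Dict.contains_empty _)
      (by simp)
  rw [hfresh]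
  have hie : (PySem.Dict.empty : PySem.Dict String (List Int)).items = [] := rfl
  rw [hie, List.nil_append]
  apply List.map_congr_left
  intro s hs
  show (s, lookup.getD s []) = _
  rw [hgetD s ((PySem.List.mem_dedup _ _).mp hs)]

-- ===== VERDICT (by name: the statement is the Claim_ definition above) =====
theorem compute_cubes_spec : Claim_equal_compute_cubes := by
  intro u _
  show compute_cubes u = compute_cubes_alt u
  rw [pv_A_items, pv_B_items]
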